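-- pv_equiv track=rewrite | github.com/pypi-data/pypi-mirror-398 | packages/bioguider/bioguider-0.2.52.tar.gz/bioguider-0.2.52/bioguider/utils/r_file_handler.py | _matching_brace_pos_in_text
-- ===== SOURCE A (Python) =====
-- from typing import List, Optional, Tuple
--
-- def _matching_brace_pos_in_text(text: str, open_idx: int) -> Optional[int]:
--     in_string: Optional[str] = None
--     escape = False
--     in_comment = False
--     depth = 0
--     for i in range(open_idx, len(text)):
--         ch = text[i]
--         if in_comment:
--             if ch == '\n':
--                 in_comment = False
--             continue
--         if in_string:
--             if escape:
--                 escape = False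
--             elif ch == '\\':
--                 escape = True
--             elif ch == in_string:
--                 in_string = None
--             continue
--         if ch == '#':
--             in_comment = True
--             continue
--         if ch == '"' or ch == "'":
--             in_string = ch
--             continue
--         if ch == '{':
--             depth += 1
--         elif ch == '}':
--             depth -= 1
--             if depth == 0:
--                 return i
--     return None
-- ===== SOURCE B (Python) =====
-- from typing import Optional
--
--
-- def _skip_string(text: str, i: int, quote: str) -> int:
--     # return the index just past the closing quote (len(text)+k if unterminated)
--     n = len(text)
--     while i < n:
--         ch = text[i]
--         if ch == '\\':
--             i += 2
--         elif ch == quote: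
--             return i + 1
--         else:
--             i += 1
--     return i
--
--
-- def _skip_comment(text: str, i: int) -> int:
--     # return the index just past the terminating newline
--     n = len(text)
--     while i < n and text[i] != '\n':
--         i += 1
--     return i + 1
--
--
-- def _matching_brace_pos_in_text(text: str, open_idx: int) -> Optional[int]:
--     n = len(text)
--     depth = 0
--     i = open_idx
--     while i < n:
--         ch = text[i]
--         if ch == '#':
--             i = _skip_comment(text, i + 1)
--         elif ch == '"' or ch == "'":
--             i = _skip_string(text, i + 1, ch)
--         elif ch == '{':
--             depth += 1
--             i += 1
--         elif ch == '}':
--             depth -= 1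
--             if depth == 0:
--                 return i
--             i += 1
--         else:
--             i += 1
--     return None
-- ===== Notes on version B (the rewrite author's own statement) =====
-- stated objective: alternative
-- what changed: Replaced the single per-character scanner with in_string/escape/in_comment boolean state flags by a tokenizing scan that, on seeing '#' or a quote, jumps past the whole comment or string literal with dedicated skip helpers, so the main loop only ever sees code characters and the depth counter.
import Mathlib
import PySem

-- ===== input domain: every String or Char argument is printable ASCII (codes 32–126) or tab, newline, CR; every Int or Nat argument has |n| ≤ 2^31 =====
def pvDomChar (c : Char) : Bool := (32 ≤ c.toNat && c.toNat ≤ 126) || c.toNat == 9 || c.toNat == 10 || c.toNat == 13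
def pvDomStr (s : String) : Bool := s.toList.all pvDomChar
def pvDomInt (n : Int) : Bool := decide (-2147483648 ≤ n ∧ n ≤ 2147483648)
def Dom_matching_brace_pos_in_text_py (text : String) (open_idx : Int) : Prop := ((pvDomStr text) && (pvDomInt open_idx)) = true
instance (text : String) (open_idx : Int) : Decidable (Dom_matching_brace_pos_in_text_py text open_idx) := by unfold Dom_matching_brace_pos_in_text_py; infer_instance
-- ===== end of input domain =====

-- B replaces A's per-character flag machine (in_string/escape/in_comment) by a tokenizing scan
-- that jumps over comments and string literals with dedicated skip helpers; objective: alternative.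


-- measure fact cited by the ports' decreasing_by (kept above the ports for that reason)
theorem pvMeasureLt {n i j : Int} (h : i < n) (hij : i < j) :
    (n - j).toNat < (n - i).toNat :=
  (Int.toNat_lt_toNat (sub_pos.mpr h)).mpr (sub_lt_sub_left hij n)

-- ===== PORT A =====
-- A's for-loop over range(open_idx, len(text)) as recursion on the index i, carrying the
-- exact state (in_string, escape, in_comment, depth); text[i] is PySem.List.pyGet?
-- (none = IndexError, rendered as `none` here; those inputs are excluded by Pre_).
def pyAGo (cs : List Char) (instr : Option Char) (esc : Bool) (incom : Bool)
    (depth : Int) (i : Int) : Option Int :=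
  if _h : i < (cs.length : Int) then
    match PySem.List.pyGet? cs i with
    | none => none    -- IndexError (outside Pre_)
    | some ch =>
      if incom then
        if ch = '\n' then pyAGo cs instr esc false depth (i+1)
        else pyAGo cs instr esc incom depth (i+1)
      else
        match instr with
        | some q =>
          if esc then pyAGo cs (some q) false incom depth (i+1)
          else if ch = '\\' then pyAGo cs (some q) true incom depth (i+1)
          else if ch = q then pyAGo cs none esc incom depth (i+1)
          else pyAGo cs (some q) esc incom depth (i+1)
        | none =>
          if ch = '#' then pyAGo cs instr esc true depth (i+1)
          else if ch = '"' ∨ ch = '\'' then pyAGo cs (some ch) esc incom depth (i+1)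
          else if ch = '{' then pyAGo cs instr esc incom (depth+1) (i+1)
          else if ch = '}' then
            if depth - 1 = 0 then some i
            else pyAGo cs instr esc incom (depth-1) (i+1)
          else pyAGo cs instr esc incom depth (i+1)
  else none
termination_by ((cs.length : Int) - i).toNat
decreasing_by all_goals exact pvMeasureLt ‹i < (cs.length : Int)› (lt_add_one i)

def matching_brace_pos_in_text_py (text : String) (open_idx : Int) : Option Int :=
  pyAGo text.toList none false false 0 open_idx

-- ===== PORT B =====
-- helper _skip_string: index just past the closing quote (character after a backslash skipped)
def pySkipString (cs : List Char) (q : Char) (i : Int) : Int :=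
  if h : i < (cs.length : Int) then
    -- text[i]; in range on every run Pre_ admits (Python raises outside)
    let ch := (PySem.List.pyGet? cs i).getD ' '
    if ch = '\\' then pySkipString cs q (i+2)
    else if ch = q then i + 1
    else pySkipString cs q (i+1)
  else i
termination_by ((cs.length : Int) - i).toNat
decreasing_by
  · exact pvMeasureLt ‹i < (cs.length : Int)› (lt_add_of_pos_right i two_pos)
  · exact pvMeasureLt ‹i < (cs.length : Int)› (lt_add_one i)

-- helper _skip_comment: index just past the terminating newline
def pySkipComment (cs : List Char) (i : Int) : Int :=
  if h : i < (cs.length : Int) then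
    if (PySem.List.pyGet? cs i).getD ' ' ≠ '\n' then pySkipComment cs (i+1)
    else i + 1
  else i + 1
termination_by ((cs.length : Int) - i).toNat
decreasing_by exact pvMeasureLt ‹i < (cs.length : Int)› (lt_add_one i)

theorem pySkipString_le (cs : List Char) (q : Char) (i : Int) : i ≤ pySkipString cs q i := by
  rw [pySkipString]
  split
  next h =>
    dsimp only
    split_ifs
    · exact le_trans (le_add_of_nonneg_right zero_le_two) (pySkipString_le cs q (i+2))
    · exact (lt_add_one i).le
    · exact le_trans (lt_add_one i).le (pySkipString_le cs q (i+1))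
  next h => exact le_refl i
termination_by ((cs.length : Int) - i).toNat
decreasing_by
  · exact pvMeasureLt ‹i < (cs.length : Int)› (lt_add_of_pos_right i two_pos)
  · exact pvMeasureLt ‹i < (cs.length : Int)› (lt_add_one i)

theorem pySkipComment_lt (cs : List Char) (i : Int) : i < pySkipComment cs i := by
  rw [pySkipComment]
  split
  next h =>
    split_ifs
    · exact lt_trans (lt_add_one i) (pySkipComment_lt cs (i+1))
    · exact lt_add_one i
  next h => exact lt_add_one i
termination_by ((cs.length : Int) - i).toNat
decreasing_by exact pvMeasureLt ‹i < (cs.length : Int)› (lt_add_one i)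

-- B's outer while-loop: one step per token, jumping with the helpers
def pyBGo (cs : List Char) (depth : Int) (i : Int) : Option Int :=
  if _h : i < (cs.length : Int) then
    match PySem.List.pyGet? cs i with
    | none => none    -- IndexError (outside Pre_)
    | some ch =>
      if ch = '#' then pyBGo cs depth (pySkipComment cs (i+1))
      else if ch = '"' ∨ ch = '\'' then pyBGo cs depth (pySkipString cs ch (i+1))
      else if ch = '{' then pyBGo cs (depth+1) (i+1)
      else if ch = '}' then
        if depth - 1 = 0 then some i
        else pyBGo cs (depth-1) (i+1)
      else pyBGo cs depth (i+1)
  else none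
termination_by ((cs.length : Int) - i).toNat
decreasing_by
  · exact pvMeasureLt ‹i < (cs.length : Int)› (lt_trans (lt_add_one i) (pySkipComment_lt cs (i+1)))
  · exact pvMeasureLt ‹i < (cs.length : Int)› (lt_of_lt_of_le (lt_add_one i) (pySkipString_le cs ch (i+1)))
  all_goals exact pvMeasureLt ‹i < (cs.length : Int)› (lt_add_one i)

def matching_brace_pos_in_text_py_alt (text : String) (open_idx : Int) : Option Int :=
  pyBGo text.toList 0 open_idx

-- ===== PRECONDITION & SPEC =====
-- Pre_ excludes exactly the inputs where A raises IndexError: open_idx < -len(text)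
-- (Python's negative indices wrap above that bound, and both programs wrap identically).
def Pre_matching_brace_pos_in_text_py (text : String) (open_idx : Int) : Prop :=
  -(text.length : Int) ≤ open_idx
instance (text : String) (open_idx : Int) : Decidable (Pre_matching_brace_pos_in_text_py text open_idx) := by
  unfold Pre_matching_brace_pos_in_text_py; infer_instance

def pvWitness_matching_brace_pos_in_text_py : String × Int := ("{ x <- c(1, 2) # }\n}", 0)

def Spec_matching_brace_pos_in_text_py (text : String) (open_idx : Int) (out : Option Int) : Prop := out = matching_brace_pos_in_text_py_alt text open_idx
instance (text : String) (open_idx : Int) (out : Option Int) : Decidable (Spec_matching_brace_pos_in_text_py text open_idx out) := by unfold Spec_matching_brace_pos_in_text_py; infer_instance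

-- ===== CLAIM (what is proved, stated in full; the proofs are below) =====
def Claim_equal_matching_brace_pos_in_text_py : Prop := ∀ (text : String) (open_idx : Int), Dom_matching_brace_pos_in_text_py text open_idx → Pre_matching_brace_pos_in_text_py text open_idx → Spec_matching_brace_pos_in_text_py text open_idx (matching_brace_pos_in_text_py text open_idx)

-- ===== LEMMAS AND PROOFS =====

theorem pyAGo_stop (cs : List Char) (s : Option Char) (e c : Bool) (d i : Int)
    (h : ¬ i < (cs.length : Int)) : pyAGo cs s e c d i = none := by
  rw [pyAGo, dif_neg h]

theorem pyGet?_isSome (cs : List Char) (i : Int) (hlo : -(cs.length : Int) ≤ i)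
    (hhi : i < (cs.length : Int)) : ∃ ch, PySem.List.pyGet? cs i = some ch := by
  cases hc : PySem.List.pyGet? cs i with
  | none =>
    rw [PySem.List.pyGet?_eq_none_iff] at hc
    exact absurd hc (by simp [PySem.Raise.InRange]; omega)
  | some c => exact ⟨c, rfl⟩

-- A in comment state equals A back in neutral state just past the next newline.
theorem pyAGo_comment (cs : List Char) (d : Int) (i : Int) (hlo : -(cs.length : Int) ≤ i) :
    pyAGo cs none false true d i = pyAGo cs none false false d (pySkipComment cs i) := by
  by_cases h : i < (cs.length : Int)
  · obtain ⟨ch, hch⟩ := pyGet?_isSome cs i hlo h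
    rw [pyAGo, dif_pos h, pySkipComment, dif_pos h]
    simp only [hch, Option.getD_some]
    by_cases hnl : ch = '\n'
    · simp [hnl]
    · simp only [ne_eq, hnl, not_false_eq_true, if_pos]
      exact pyAGo_comment cs d (i+1) (by omega)
  · rw [pyAGo_stop cs none false true d i h,
      pySkipComment, dif_neg h,
      pyAGo_stop cs none false false d (i+1) (by omega)]
termination_by ((cs.length : Int) - i).toNat
decreasing_by all_goals · omega

-- Stepping A once in escape state just clears the flag.
theorem pyAGo_escape (cs : List Char) (q : Char) (d : Int) (i : Int)
    (hlo : -(cs.length : Int) ≤ i) :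
    pyAGo cs (some q) true false d i = pyAGo cs (some q) false false d (i+1) := by
  by_cases h : i < (cs.length : Int)
  · obtain ⟨ch, hch⟩ := pyGet?_isSome cs i hlo h
    rw [pyAGo, dif_pos h]
    simp [hch]
  · rw [pyAGo_stop cs (some q) true false d i h,
      pyAGo_stop cs (some q) false false d (i+1) (by omega)]

-- A in string state equals A back in neutral state just past the closing quote.
theorem pyAGo_string (cs : List Char) (q : Char) (d : Int) (i : Int)
    (hlo : -(cs.length : Int) ≤ i) :
    pyAGo cs (some q) false false d i = pyAGo cs none false false d (pySkipString cs q i) := by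
  by_cases h : i < (cs.length : Int)
  · obtain ⟨ch, hch⟩ := pyGet?_isSome cs i hlo h
    rw [pyAGo, dif_pos h, pySkipString, dif_pos h]
    simp only [hch, Option.getD_some]
    by_cases hbs : ch = '\\'
    · simp only [if_pos hbs, Bool.false_eq_true, if_false]
      rw [pyAGo_escape cs q d (i+1) (by omega)]
      have h2 : i + 1 + 1 = i + 2 := by omega
      rw [h2]
      exact pyAGo_string cs q d (i+2) (by omega)
    · by_cases hq : ch = q
      · subst hq
        simp [hbs]
      · simp only [if_neg hbs, if_neg hq, Bool.false_eq_true, if_false]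
        exact pyAGo_string cs q d (i+1) (by omega)
  · rw [pyAGo_stop cs (some q) false false d i h,
      pySkipString, dif_neg h,
      pyAGo_stop cs none false false d i h]
termination_by ((cs.length : Int) - i).toNat
decreasing_by all_goals · omega

-- Main simulation: A's neutral state = B's outer loop.
theorem pyAGo_eq_pyBGo (cs : List Char) (d : Int) (i : Int) (hlo : -(cs.length : Int) ≤ i) :
    pyAGo cs none false false d i = pyBGo cs d i := by
  by_cases h : i < (cs.length : Int)
  · obtain ⟨ch, hch⟩ := pyGet?_isSome cs i hlo h
    rw [pyBGo, dif_pos h, hch]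
    rw [pyAGo, dif_pos h, hch]
    by_cases hc : ch = '#'
    · simp only [hc, reduceIte]
      rw [pyAGo_comment cs d (i+1) (by omega)]
      have hsk := pySkipComment_lt cs (i+1)
      exact pyAGo_eq_pyBGo cs d (pySkipComment cs (i+1)) (by omega)
    · by_cases hs : ch = '"' ∨ ch = '\''
      · simp only [hc, hs, if_false, if_true]
        rw [pyAGo_string cs ch d (i+1) (by omega)]
        have hsk := pySkipString_le cs ch (i+1)
        exact pyAGo_eq_pyBGo cs d (pySkipString cs ch (i+1)) (by omega)
      · by_cases ho : ch = '{'
        · simp only [ho, if_true]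
          exact pyAGo_eq_pyBGo cs (d+1) (i+1) (by omega)
        · by_cases hcl : ch = '}'
          · simp only [hcl, if_true]
            by_cases hd : d - 1 = 0
            · simp [hd]
            · simp only [hd, if_false]
              exact pyAGo_eq_pyBGo cs (d-1) (i+1) (by omega)
          · simp only [hc, hs, ho, hcl, if_false]
            exact pyAGo_eq_pyBGo cs d (i+1) (by omega)
  · rw [pyAGo_stop cs none false false d i h, pyBGo, dif_neg h]
termination_by ((cs.length : Int) - i).toNat
decreasing_by all_goals · omega

-- ===== VERDICT (by name: the statement is the Claim_ definition above) =====
theorem matching_brace_pos_in_text_py_spec : Claim_equal_matching_brace_pos_in_text_py := by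
  intro text open_idx _ hpre
  unfold Spec_matching_brace_pos_in_text_py matching_brace_pos_in_text_py matching_brace_pos_in_text_py_alt
  exact pyAGo_eq_pyBGo text.toList 0 open_idx (by simpa [Pre_matching_brace_pos_in_text_py] using hpre)
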